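-- pv_equiv track=rewrite | github.com/emcramer/tme-trajectory-landscape | code/utils.py | add_suffix_to_repeats
-- ===== SOURCE A (Python) =====
-- def add_suffix_to_repeats(items):
--     counts = {}
--     result = []
--
--     for item in items:
--         if item not in counts:
--             counts[item] = 0
--         else:
--             counts[item] += 1
--         result.append(f"{item}_{counts[item]}")
--
--     return result
-- ===== SOURCE B (Python) =====
-- def add_suffix_to_repeats(items):
--     items = list(items)
--     return [f"{x}_{items[:i].count(x)}" for i, x in enumerate(items)]
-- ===== Notes on version B (the rewrite author's own statement) =====
-- stated objective: simpler
-- what changed: Replaces the running-count dict and explicit accumulator loop with a single comprehension in which each element's suffix is the count of its occurrences in the preceding prefix items[:i].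
import Mathlib
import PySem

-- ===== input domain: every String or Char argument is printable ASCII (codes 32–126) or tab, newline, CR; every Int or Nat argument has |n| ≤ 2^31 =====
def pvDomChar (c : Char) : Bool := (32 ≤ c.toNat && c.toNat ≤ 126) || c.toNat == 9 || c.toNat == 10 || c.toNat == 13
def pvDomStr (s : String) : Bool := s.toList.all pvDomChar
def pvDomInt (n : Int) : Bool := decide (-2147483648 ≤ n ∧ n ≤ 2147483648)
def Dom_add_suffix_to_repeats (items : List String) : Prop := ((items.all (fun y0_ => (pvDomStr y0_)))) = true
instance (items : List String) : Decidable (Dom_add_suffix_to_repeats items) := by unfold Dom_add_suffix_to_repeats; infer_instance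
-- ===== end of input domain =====

-- B replaces A's running-count dict with a comprehension counting each element's prior occurrences in the prefix (alternative decomposition, not faster).


-- ===== PORT A =====
-- literal port: dict of running counts, list accumulator
def add_suffix_to_repeats (items : List String) : List String :=
  (items.foldl
    (fun (st : PySem.Dict String Int × List String) item =>
      let counts :=
        match st.1.get? item with
        | none => st.1.insert item 0          -- item not in counts: counts[item] = 0
        | some v => st.1.insert item (v + 1)  -- counts[item] += 1
      (counts, st.2 ++ [item ++ "_" ++ PySem.Int.toStr (counts.getD item 0)]))
    (PySem.Dict.empty, [])).2

-- ===== PORT B =====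
-- literal port of Source B: suffix i is items[:i].count(x)
def add_suffix_to_repeats_alt (items : List String) : List String :=
  (PySem.List.enumerate items).map (fun ix =>
    ix.2 ++ "_" ++ PySem.Int.toStr (PySem.List.count (PySem.List.slice items none (some ix.1)) ix.2))

-- ===== PRECONDITION & SPEC =====
def Spec_add_suffix_to_repeats (items : List String) (out : List String) : Prop := out = add_suffix_to_repeats_alt items
instance (items : List String) (out : List String) : Decidable (Spec_add_suffix_to_repeats items out) := by unfold Spec_add_suffix_to_repeats; infer_instance

-- ===== CLAIM (what is proved, stated in full; the proofs are below) =====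
def Claim_equal_add_suffix_to_repeats : Prop := ∀ (items : List String), Dom_add_suffix_to_repeats items → Spec_add_suffix_to_repeats items (add_suffix_to_repeats items)

-- ===== LEMMAS AND PROOFS =====

-- canonical form: each element suffixed with its number of occurrences in the processed prefix p
def cAux (p rest : List String) : List String :=
  match rest with
  | [] => []
  | x :: t => (x ++ "_" ++ PySem.Int.toStr (List.count x p : Int)) :: cAux (p ++ [x]) t

def stepA (st : PySem.Dict String Int × List String) (item : String) :
    PySem.Dict String Int × List String :=
  let counts :=
    match st.1.get? item with
    | none => st.1.insert item 0
    | some v => st.1.insert item (v + 1)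
  (counts, st.2 ++ [item ++ "_" ++ PySem.Int.toStr (counts.getD item 0)])

lemma a_loop : ∀ (rest : List String) (d : PySem.Dict String Int) (acc p : List String),
    (∀ x, d.get? x = if x ∈ p then some ((List.count x p : Int) - 1) else none) →
    (rest.foldl stepA (d, acc)).2 = acc ++ cAux p rest := by
  intro rest
  induction rest with
  | nil => intro d acc p _; simp [cAux]
  | cons x t ih =>
    intro d acc p hinv
    have hx := hinv x
    by_cases hmem : x ∈ p
    · have hc : 1 ≤ List.count x p := List.one_le_count_iff.mpr hmem
      simp only [hmem, if_pos] at hx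
      have hfold : (x :: t).foldl stepA (d, acc) =
          t.foldl stepA (d.insert x ((List.count x p : Int) - 1 + 1),
            acc ++ [x ++ "_" ++ PySem.Int.toStr
              ((d.insert x ((List.count x p : Int) - 1 + 1)).getD x 0)]) := by
        simp [stepA, hx]
      have hinv' : ∀ y, (d.insert x ((List.count x p : Int) - 1 + 1)).get? y =
          if y ∈ p ++ [x] then some ((List.count y (p ++ [x]) : Int) - 1) else none := by
        intro y
        rw [PySem.Dict.get?_insert]
        by_cases hy : y = x
        · subst hy
          simp [hmem, List.count_append]
        · rw [if_neg hy, hinv y]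
          have hcnt : List.count y (p ++ [x]) = List.count y p := by
            simp [List.count_append, List.count_singleton]
            exact fun h => hy h.symm
          simp [hcnt, hy]
      rw [hfold, ih _ _ _ hinv']
      have hval : ((List.count x p : Int) - 1 + 1) = (List.count x p : Int) := by ring
      have hgd : (d.insert x ((List.count x p : Int) - 1 + 1)).getD x 0
          = (List.count x p : Int) := by
        rw [PySem.Dict.getD_insert]; simp [hval]
      rw [hgd]
      simp [cAux]
    · have hc : List.count x p = 0 := List.count_eq_zero.mpr hmem
      simp only [hmem, if_neg, not_false_iff] at hx
      have hfold : (x :: t).foldl stepA (d, acc) =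
          t.foldl stepA (d.insert x 0,
            acc ++ [x ++ "_" ++ PySem.Int.toStr ((d.insert x 0).getD x 0)]) := by
        simp [stepA, hx]
      have hinv' : ∀ y, (d.insert x 0).get? y =
          if y ∈ p ++ [x] then some ((List.count y (p ++ [x]) : Int) - 1) else none := by
        intro y
        rw [PySem.Dict.get?_insert]
        by_cases hy : y = x
        · subst hy
          simp [List.count_append, hc]
        · rw [if_neg hy, hinv y]
          have hcnt : List.count y (p ++ [x]) = List.count y p := by
            simp [List.count_append, List.count_singleton]
            exact fun h => hy h.symm
          simp [hcnt, hy]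
      rw [hfold, ih _ _ _ hinv']
      have hgd : (d.insert x 0).getD x 0 = (0 : Int) := by
        rw [PySem.Dict.getD_insert]; simp
      rw [hgd]
      simp [cAux, hc]

lemma b_loop (items : List String) : ∀ (rest p : List String), p ++ rest = items →
    (PySem.List.enumerate rest (p.length : Int)).map (fun ix =>
      ix.2 ++ "_" ++ PySem.Int.toStr (PySem.List.count (PySem.List.slice items none (some ix.1)) ix.2))
    = cAux p rest := by
  intro rest
  induction rest with
  | nil => intro p _; simp [PySem.List.enumerate_nil, cAux]
  | cons x t ih =>
    intro p hp
    rw [PySem.List.enumerate_cons, List.map_cons]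
    have hslice : PySem.List.slice items none (some (p.length : Int)) = p := by
      rw [PySem.List.slice_to_natCast, ← hp]
      simp
    have htail := ih (p ++ [x]) (by simpa using hp)
    have hlen : ((p ++ [x]).length : Int) = (p.length : Int) + 1 := by
      simp
    rw [hlen] at htail
    simp only [cAux]
    rw [htail]
    simp [PySem.List.count_eq, hslice]

lemma a_eq_caux (items : List String) : add_suffix_to_repeats items = cAux [] items := by
  unfold add_suffix_to_repeats
  have h := a_loop items PySem.Dict.empty [] [] (by intro x; simp)
  simpa [stepA] using h

lemma b_eq_caux (items : List String) : add_suffix_to_repeats_alt items = cAux [] items := by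
  unfold add_suffix_to_repeats_alt
  have h := b_loop items items [] rfl
  simpa using h

-- ===== VERDICT (by name: the statement is the Claim_ definition above) =====
theorem add_suffix_to_repeats_spec : Claim_equal_add_suffix_to_repeats := by
  intro items _
  unfold Spec_add_suffix_to_repeats
  rw [a_eq_caux, b_eq_caux]
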